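-- pv_equiv track=rewrite | github.com/Artiomion/AOIS | Lab_3/calculus_method.py | can_glue
-- ===== SOURCE A (Python) =====
-- def parse_term(term):
--     term = term.replace('(', '').replace(')', '')
--     literals = term.split('&' if '&' in term else '|')
--     return [lit.replace('(!', '!').replace(')', '') for lit in literals]
--
-- def can_glue(term1, term2, op_type='&'):
--     literals1 = parse_term(term1)
--     literals2 = parse_term(term2)
--
--     if len(literals1) != len(literals2):
--         return False, None
--
--     differences = 0
--     glued_term = []
--     diff_var = None
--
--     for lit1, lit2 in zip(literals1, literals2):
--         var1 = lit1.replace('!', '') if '!' in lit1 else lit1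
--         var2 = lit2.replace('!', '') if '!' in lit2 else lit2
--
--         if var1 != var2:
--             return False, None
--         if lit1 != lit2:
--             differences += 1
--             diff_var = var1
--         else:
--             glued_term.append(lit1)
--
--     if differences != 1:
--         return False, None
--
--     return True, op_type.join(glued_term)
-- ===== SOURCE B (Python) =====
-- def parse_term(term):
--     term = term.replace('(', '').replace(')', '')
--     literals = term.split('&' if '&' in term else '|')
--     return [lit.replace('(!', '!').replace(')', '') for lit in literals]
--
-- def can_glue(term1, term2, op_type='&'):
--     a = parse_term(term1)
--     b = parse_term(term2)
--     if len(a) != len(b):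
--         return False, None
--     # two-pointer style: locate the first mismatching position, then compare
--     # the remaining tails wholesale; only that single position is ever stripped
--     p = 0
--     while p < len(a) and a[p] == b[p]:
--         p += 1
--     if p == len(a):
--         return False, None
--     if a[p + 1:] != b[p + 1:]:
--         return False, None
--     if a[p].replace('!', '') != b[p].replace('!', ''):
--         return False, None
--     return True, op_type.join(a[:p] + a[p + 1:])
-- ===== Notes on version B (the rewrite author's own statement) =====
-- stated objective: alternative
-- what changed: A's fused zip loop (per-pair '!'-stripped variable comparison, a difference counter and a glued-literal accumulator) is replaced by a first-mismatch search: advance a pointer past the common prefix, compare the two remaining tails wholesale, strip '!' only at that single position, and build the result by splicing that position out of the literal list.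
import Mathlib
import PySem

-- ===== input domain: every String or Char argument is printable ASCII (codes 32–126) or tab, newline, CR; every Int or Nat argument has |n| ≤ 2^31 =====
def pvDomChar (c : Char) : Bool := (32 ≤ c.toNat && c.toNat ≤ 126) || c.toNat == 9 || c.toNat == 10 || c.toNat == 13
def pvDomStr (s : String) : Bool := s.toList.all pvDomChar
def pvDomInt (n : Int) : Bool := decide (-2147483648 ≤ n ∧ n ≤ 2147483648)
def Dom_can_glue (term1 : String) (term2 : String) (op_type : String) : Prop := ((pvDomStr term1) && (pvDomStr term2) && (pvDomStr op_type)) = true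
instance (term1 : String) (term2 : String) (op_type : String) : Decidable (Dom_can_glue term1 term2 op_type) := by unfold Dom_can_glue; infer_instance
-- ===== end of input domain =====

-- B replaces A's fused zip loop (per-pair variable check + diff counter + glued accumulator)
-- by a first-mismatch search: advance a pointer past the common prefix, compare the two tails
-- after that point wholesale, strip '!' only at that single position, and splice it out
-- (objective: alternative decomposition, same asymptotic cost).

-- ===== PORT A =====
-- shared helper: parse_term, identical in A and B (B keeps it unchanged)
def pvParseTerm (term : String) : List String :=
  let t := PySem.Str.replace (PySem.Str.replace term "(" "") ")" ""
  -- split? is none only for sep = ""; the separator here is "&" or "|", so getD is never taken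
  let literals := (PySem.Str.split? t (if PySem.Str.isIn "&" t then "&" else "|")).getD []
  literals.map (fun lit => PySem.Str.replace (PySem.Str.replace lit "(!" "!") ")" "")

def pvGlueLoop (op_type : String) : List (String × String) → Int → List String → Option String → Bool × Option String
  | [], differences, glued, _ =>
      if differences ≠ 1 then (false, none)
      else (true, some (PySem.Str.join op_type glued))
  | (lit1, lit2) :: rest, differences, glued, diff_var =>
      let var1 := if PySem.Str.isIn "!" lit1 then PySem.Str.replace lit1 "!" "" else lit1
      let var2 := if PySem.Str.isIn "!" lit2 then PySem.Str.replace lit2 "!" "" else lit2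
      if var1 ≠ var2 then (false, none)
      else if lit1 ≠ lit2 then pvGlueLoop op_type rest (differences + 1) glued (some var1)
      else pvGlueLoop op_type rest differences (glued ++ [lit1]) diff_var

def can_glue (term1 : String) (term2 : String) (op_type : String) : Bool × Option String :=
  let literals1 := pvParseTerm term1
  let literals2 := pvParseTerm term2
  if literals1.length ≠ literals2.length then (false, none)
  else pvGlueLoop op_type (literals1.zip literals2) 0 [] none

-- ===== PORT B =====
def pvStrip (lit : String) : String := PySem.Str.replace lit "!" ""

-- the 'while p < len(a) and a[p] == b[p]: p += 1' pointer walk (lists have equal length here)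
def pvFirstDiff : List String → List String → Nat
  | x :: xs, y :: ys => if x == y then pvFirstDiff xs ys + 1 else 0
  | _, _ => 0

def can_glue_alt (term1 : String) (term2 : String) (op_type : String) : Bool × Option String :=
  let a := pvParseTerm term1
  let b := pvParseTerm term2
  if a.length ≠ b.length then (false, none)
  else
    let p := pvFirstDiff a b
    if p = a.length then (false, none)
    else if PySem.List.slice a (some ((p : Int) + 1)) none ≠ PySem.List.slice b (some ((p : Int) + 1)) none then (false, none)
    -- a[p], b[p]: here p < len a = len b, so the getD default is never taken (exact for Python a[p])
    else if pvStrip (a.getD p "") ≠ pvStrip (b.getD p "") then (false, none)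
    else (true, some (PySem.Str.join op_type
      (PySem.List.slice a none (some (p : Int)) ++ PySem.List.slice a (some ((p : Int) + 1)) none)))

-- ===== PRECONDITION & SPEC =====
def Spec_can_glue (term1 : String) (term2 : String) (op_type : String) (out : Bool × Option String) : Prop := out = can_glue_alt term1 term2 op_type
instance (term1 : String) (term2 : String) (op_type : String) (out : Bool × Option String) : Decidable (Spec_can_glue term1 term2 op_type out) := by unfold Spec_can_glue; infer_instance

-- ===== CLAIM (what is proved, stated in full; the proofs are below) =====
def Claim_equal_can_glue : Prop := ∀ (term1 : String) (term2 : String) (op_type : String), Dom_can_glue term1 term2 op_type → Spec_can_glue term1 term2 op_type (can_glue term1 term2 op_type)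

-- ===== LEMMAS AND PROOFS =====

-- replace with a non-occurring nonempty pattern is the identity (the fuel loop only walks the list)
theorem pv_replace_go_no_occ (old new : List Char) :
    ∀ (fuel : Nat) (l acc : List Char), ¬ old <:+: l →
      PySem.Chars.replace.go old new fuel l acc = acc.reverse ++ l := by
  intro fuel
  induction fuel with
  | zero => intro l acc _; simp [PySem.Chars.replace.go]
  | succ n ih =>
    intro l acc h
    cases l with
    | nil => simp [PySem.Chars.replace.go]
    | cons c t =>
      rw [PySem.Chars.replace.go]
      have hpre : old.isPrefixOf (c :: t) = false := by
        by_contra hx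
        exact h (List.IsPrefix.isInfix (List.isPrefixOf_iff_prefix.mp (by simpa using hx)))
      rw [if_neg (by simp [hpre])]
      rw [ih t (c :: acc) (fun hx => h (List.infix_cons hx))]
      simp

theorem pv_strip_id (s : String) (h : PySem.Str.isIn "!" s = false) : pvStrip s = s := by
  simp only [PySem.Str.isIn_eq, String.toList] at h
  have hinf : ¬ (['!'] <:+: s.toList) := by
    rw [← PySem.Chars.isIn_eq_false_iff]
    simpa using h
  have hl : (pvStrip s).toList = s.toList := by
    simp only [pvStrip, PySem.Str.toList_replace]
    rw [PySem.Chars.replace, if_neg (by simp), pv_replace_go_no_occ _ _ _ _ _ (by simpa using hinf)]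
    simp
  exact String.toList_inj.mp hl

theorem pv_condStrip_eq (l : String) :
    (if PySem.Str.isIn "!" l then PySem.Str.replace l "!" "" else l) = pvStrip l := by
  by_cases h : PySem.Str.isIn "!" l = true
  · rw [if_pos h]; rfl
  · rw [if_neg h, pv_strip_id l (by simpa using h)]

-- characterization of A's fused loop
theorem pv_glueLoop_eq (op : String) (pairs : List (String × String)) (d : Int) (g : List String) (dv : Option String) :
    pvGlueLoop op pairs d g dv =
      if pairs.any (fun p => pvStrip p.1 != pvStrip p.2) then (false, none)
      else if d + (pairs.countP (fun p => p.1 != p.2) : Int) ≠ 1 then (false, none)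
      else (true, some (PySem.Str.join op (g ++ (pairs.filter (fun p => p.1 == p.2)).map Prod.fst))) := by
  induction pairs generalizing d g dv with
  | nil => simp only [pvGlueLoop, List.any_nil, List.countP_nil, List.filter_nil, List.map_nil,
      List.append_nil, Bool.false_eq_true, if_false, Nat.cast_zero, Int.add_zero]
  | cons p rest ih =>
    obtain ⟨l1, l2⟩ := p
    simp only [pvGlueLoop, pv_condStrip_eq]
    by_cases hm : pvStrip l1 = pvStrip l2
    · rw [if_neg (by simp [hm])]
      by_cases hd : l1 = l2
      · rw [if_neg (by simp [hd]), ih]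
        simp [hd]
        simp only [hm, bne_self_eq_false, Bool.false_or]
      · rw [if_pos hd, ih]
        have hhead : (pvStrip l1 != pvStrip l2) = false := by simp [hm]
        have hne1 : (l1 != l2) = true := by simp [hd]
        have hfe : (l1 == l2) = false := by simp [hd]
        simp only [List.any_cons, hhead, Bool.false_or, List.countP_cons, List.filter_cons,
          hne1, hfe, if_true, Bool.false_eq_true, if_false]
        have harith : d + 1 + ((rest.countP (fun p => p.1 != p.2) : Nat) : Int)
            = d + (((rest.countP (fun p => p.1 != p.2) + 1 : Nat)) : Int) := by push_cast; ring
        rw [harith]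
    · rw [if_pos (by simpa using hm)]
      rw [if_pos (by simp [hm])]

theorem pv_firstDiff_le (a b : List String) : pvFirstDiff a b ≤ a.length := by
  induction a generalizing b with
  | nil => cases b <;> simp [pvFirstDiff]
  | cons x xs ih =>
    cases b with
    | nil => simp [pvFirstDiff]
    | cons y ys =>
      by_cases h : x = y
      · simp only [pvFirstDiff, h, beq_self_eq_true, if_true, List.length_cons]
        exact Nat.succ_le_succ (ih ys)
      · simp [pvFirstDiff, h]

theorem pv_count_zero (a b : List String) (hlen : a.length = b.length) :
    (((a.zip b).countP fun q => q.1 != q.2) = 0 ↔ a = b) := by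
  induction a generalizing b with
  | nil => cases b <;> simp at hlen ⊢
  | cons x xs ih =>
    cases b with
    | nil => simp at hlen
    | cons y ys =>
      simp only [List.length_cons, Nat.succ_inj] at hlen
      by_cases h : x = y
      · simp [List.zip_cons_cons, List.countP_cons, h, ih ys hlen]
      · simp only [List.zip_cons_cons, List.countP_cons]
        constructor
        · intro hc; exfalso; simp [h] at hc
        · intro hc; exact absurd (List.cons_eq_cons.mp hc).1 h

theorem pv_firstDiff_eq_len (a b : List String) (hlen : a.length = b.length) :
    (pvFirstDiff a b = a.length ↔ a = b) := by
  induction a generalizing b with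
  | nil => cases b <;> simp at hlen ⊢ <;> simp [pvFirstDiff]
  | cons x xs ih =>
    cases b with
    | nil => simp at hlen
    | cons y ys =>
      simp only [List.length_cons, Nat.succ_inj] at hlen
      by_cases h : x = y
      · simp [pvFirstDiff, h, ih ys hlen]
      · constructor
        · intro hc; exfalso; simp [pvFirstDiff, h] at hc
        · intro hc; exact absurd (List.cons_eq_cons.mp hc).1 h

theorem pv_zip_self_mem (a : List String) (p : String × String) (hp : p ∈ a.zip a) : p.1 = p.2 := by
  induction a with
  | nil => simp at hp
  | cons x xs ih =>
    rcases List.mem_cons.mp (by simpa [List.zip_cons_cons] using hp) with h | h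
    · simp [h]
    · exact ih h

theorem pv_zip_self_any (a : List String) :
    ((a.zip a).any fun q => pvStrip q.1 != pvStrip q.2) = false := by
  rw [List.any_eq_false]
  intro q hq
  simp [pv_zip_self_mem a q hq]

theorem pv_zip_self_filter (a : List String) :
    (((a.zip a).filter fun q => q.1 == q.2).map Prod.fst) = a := by
  rw [List.filter_eq_self.mpr (fun q hq => by simp [pv_zip_self_mem a q hq])]
  exact List.map_fst_zip le_rfl

-- main bridge: with a mismatch at position p = pvFirstDiff a b,
-- the tail comparison ↔ diff count 1, and in that case the strip test and glued list localize to p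
theorem pv_main (a : List String) : ∀ (b : List String), a.length = b.length →
    pvFirstDiff a b < a.length →
    ((a.drop (pvFirstDiff a b + 1) = b.drop (pvFirstDiff a b + 1)) ↔
       ((a.zip b).countP fun q => q.1 != q.2) = 1)
    ∧ (a.drop (pvFirstDiff a b + 1) = b.drop (pvFirstDiff a b + 1) →
        (((a.zip b).any fun q => pvStrip q.1 != pvStrip q.2)
            = (pvStrip (a.getD (pvFirstDiff a b) "") != pvStrip (b.getD (pvFirstDiff a b) "")))
        ∧ (((a.zip b).filter fun q => q.1 == q.2).map Prod.fst
            = a.take (pvFirstDiff a b) ++ a.drop (pvFirstDiff a b + 1))) := by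
  induction a with
  | nil => intro b _ hp; simp [pvFirstDiff] at hp
  | cons x xs ih =>
    intro b hlen hp
    cases b with
    | nil => simp at hlen
    | cons y ys =>
      simp only [List.length_cons, Nat.succ_inj] at hlen
      by_cases h : x = y
      · have hfd : pvFirstDiff (x :: xs) (y :: ys) = pvFirstDiff xs ys + 1 := by
          simp [pvFirstDiff, h]
        rw [hfd] at hp ⊢
        have hp' : pvFirstDiff xs ys < xs.length := by simpa using hp
        obtain ⟨h1, h2⟩ := ih ys hlen hp'
        constructor
        · simpa [List.zip_cons_cons, List.countP_cons, h] using h1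
        · intro hdr
          have hdr' : xs.drop (pvFirstDiff xs ys + 1) = ys.drop (pvFirstDiff xs ys + 1) := by
            simpa using hdr
          obtain ⟨h3, h4⟩ := h2 hdr'
          constructor
          · simpa [List.zip_cons_cons, List.any_cons, h] using h3
          · simp [List.zip_cons_cons, List.filter_cons, h, h4]
      · have hfd : pvFirstDiff (x :: xs) (y :: ys) = 0 := by simp [pvFirstDiff, h]
        rw [hfd]
        constructor
        · simp only [List.drop_one, List.drop_zero, List.tail_cons, List.zip_cons_cons,
            List.countP_cons]
          rw [show ((x != y) = true) from by simp [h]]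
          simp only [if_true]
          constructor
          · intro he; rw [(pv_count_zero xs ys hlen).mpr he]
          · intro hc
            have : ((xs.zip ys).countP fun q => q.1 != q.2) = 0 := by omega
            exact (pv_count_zero xs ys hlen).mp this
        · intro hdr
          have hxy : xs = ys := by simpa using hdr
          subst hxy
          constructor
          · simp [List.zip_cons_cons, List.any_cons, pv_zip_self_any]
          · simp only [List.zip_cons_cons, List.filter_cons]
            rw [show ((x == y) = false) from by simp [h]]
            simp [pv_zip_self_filter]

-- bridge between A's characterized loop and B's branch structure, over arbitrary lists
theorem pv_bridge (op : String) (a b : List String) (hlen : a.length = b.length) :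
    (if ((a.zip b).any fun q => pvStrip q.1 != pvStrip q.2) then ((false : Bool), (none : Option String))
     else if (0 : Int) + (((a.zip b).countP fun q => q.1 != q.2 : Nat) : Int) ≠ 1 then (false, none)
     else (true, some (PySem.Str.join op (([] : List String) ++ ((a.zip b).filter fun q => q.1 == q.2).map Prod.fst))))
    = (if pvFirstDiff a b = a.length then ((false : Bool), (none : Option String))
       else if PySem.List.slice a (some ((pvFirstDiff a b : Int) + 1)) none ≠ PySem.List.slice b (some ((pvFirstDiff a b : Int) + 1)) none then (false, none)
       else if pvStrip (a.getD (pvFirstDiff a b) "") ≠ pvStrip (b.getD (pvFirstDiff a b) "") then (false, none)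
       else (true, some (PySem.Str.join op
         (PySem.List.slice a none (some (pvFirstDiff a b : Int)) ++ PySem.List.slice a (some ((pvFirstDiff a b : Int) + 1)) none)))) := by
  by_cases hpn : pvFirstDiff a b = a.length
  · have hab : a = b := (pv_firstDiff_eq_len a b hlen).mp hpn
    subst hab
    rw [if_pos hpn]
    rw [if_neg (by simp [pv_zip_self_any])]
    rw [if_pos (by rw [(pv_count_zero a a rfl).mpr rfl]; simp)]
  · have hp : pvFirstDiff a b < a.length := lt_of_le_of_ne (pv_firstDiff_le a b) hpn
    rw [if_neg hpn]
    obtain ⟨hiff, hrest⟩ := pv_main a b hlen hp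
    have hsl1 : PySem.List.slice a (some ((pvFirstDiff a b : Int) + 1)) none
        = a.drop (pvFirstDiff a b + 1) := by
      rw [show ((pvFirstDiff a b : Int) + 1) = ((pvFirstDiff a b + 1 : Nat) : Int) by push_cast; ring,
        PySem.List.slice_from_natCast]
    have hsl2 : PySem.List.slice b (some ((pvFirstDiff a b : Int) + 1)) none
        = b.drop (pvFirstDiff a b + 1) := by
      rw [show ((pvFirstDiff a b : Int) + 1) = ((pvFirstDiff a b + 1 : Nat) : Int) by push_cast; ring,
        PySem.List.slice_from_natCast]
    have hsl3 : PySem.List.slice a none (some (pvFirstDiff a b : Int))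
        = a.take (pvFirstDiff a b) := PySem.List.slice_to_natCast a _
    rw [hsl1, hsl2, hsl3]
    by_cases hdrop : a.drop (pvFirstDiff a b + 1) = b.drop (pvFirstDiff a b + 1)
    · have hcnt : ((a.zip b).countP fun q => q.1 != q.2) = 1 := hiff.mp hdrop
      obtain ⟨hany, hfil⟩ := hrest hdrop
      by_cases hstrip : pvStrip (a.getD (pvFirstDiff a b) "") = pvStrip (b.getD (pvFirstDiff a b) "")
      · rw [if_neg (by rw [hany]; simp only [bne_iff_ne, ne_eq, not_not]; exact hstrip)]
        rw [if_neg (by rw [hcnt]; simp)]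
        rw [if_neg (by simpa using hdrop)]
        rw [if_neg (by exact not_ne_iff.mpr hstrip)]
        rw [hfil]
        simp
      · rw [if_pos (by rw [hany]; simp only [bne_iff_ne, ne_eq]; exact hstrip)]
        rw [if_neg (by simpa using hdrop)]
        rw [if_pos (by exact hstrip)]
    · have hcnt : ((a.zip b).countP fun q => q.1 != q.2) ≠ 1 := fun hc => hdrop (hiff.mpr hc)
      by_cases hany : ((a.zip b).any fun q => pvStrip q.1 != pvStrip q.2) = true
      · rw [if_pos hany, if_pos (by simpa using hdrop)]
      · rw [if_neg hany, if_pos (by simp; omega), if_pos (by simpa using hdrop)]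
-- ===== VERDICT (by name: the statement is the Claim_ definition above) =====
theorem can_glue_spec : Claim_equal_can_glue := by
  intro t1 t2 op _
  unfold Spec_can_glue can_glue can_glue_alt
  by_cases hlen : (pvParseTerm t1).length = (pvParseTerm t2).length
  · rw [if_neg (by omega), if_neg (by omega), pv_glueLoop_eq,
      pv_bridge op (pvParseTerm t1) (pvParseTerm t2) hlen]
  · rw [if_pos hlen, if_pos hlen]
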